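-- pv_equiv track=rewrite | github.com/QwQ-maker/4box | NewWork/main_enhanced.py | compute_bit_independence
-- ===== SOURCE A (Python) =====
-- def sbox_to_component_truth_tables(sbox, n_bits):
--     """拆分S盒为各个分量的真值表"""
--     size = 1 << n_bits
--     components = []
--     for bit in range(n_bits):
--         tt = [(sbox[x] >> (n_bits - 1 - bit)) & 1 for x in range(size)]
--         components.append(tt)
--     return components
--
-- def compute_bit_independence(sbox, n_bits):
--     """计算位独立性指标"""
--     size = 1 << n_bits
--     components = sbox_to_component_truth_tables(sbox, n_bits)
--     correlations = []
--     for i in range(n_bits):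
--         for j in range(i + 1, n_bits):
--             tt1, tt2 = components[i], components[j]
--             corr = sum(1 for x in range(size) if tt1[x] == tt2[x])
--             correlations.append(abs(corr - size // 2))
--     return max(correlations) if correlations else 0
-- ===== SOURCE B (Python) =====
-- def compute_bit_independence(sbox, n_bits):
--     if n_bits < 2:
--         return 0
--     size = 1 << n_bits
--     pairs = [(i, j) for i in range(n_bits) for j in range(i + 1, n_bits)]
--     agree = {}
--     for x in range(size):
--         v = sbox[x]
--         bits = [(v >> (n_bits - 1 - k)) & 1 for k in range(n_bits)]
--         for p in pairs:
--             agree[p] = agree.get(p, 0) + (1 if bits[p[0]] == bits[p[1]] else 0)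
--     half = size // 2
--     return max(abs(agree.get(p, 0) - half) for p in pairs)
-- ===== Notes on version B (the rewrite author's own statement) =====
-- stated objective: alternative
-- what changed: Instead of building all n component truth tables and then re-scanning a table slice for every bit pair, B makes a single sweep over the S-box entries, extracting each value's bits once and accumulating a pairwise agreement counter keyed by (i,j), then reduces to the max deviation at the end (returning 0 outright when n_bits < 2).
import Mathlib
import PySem

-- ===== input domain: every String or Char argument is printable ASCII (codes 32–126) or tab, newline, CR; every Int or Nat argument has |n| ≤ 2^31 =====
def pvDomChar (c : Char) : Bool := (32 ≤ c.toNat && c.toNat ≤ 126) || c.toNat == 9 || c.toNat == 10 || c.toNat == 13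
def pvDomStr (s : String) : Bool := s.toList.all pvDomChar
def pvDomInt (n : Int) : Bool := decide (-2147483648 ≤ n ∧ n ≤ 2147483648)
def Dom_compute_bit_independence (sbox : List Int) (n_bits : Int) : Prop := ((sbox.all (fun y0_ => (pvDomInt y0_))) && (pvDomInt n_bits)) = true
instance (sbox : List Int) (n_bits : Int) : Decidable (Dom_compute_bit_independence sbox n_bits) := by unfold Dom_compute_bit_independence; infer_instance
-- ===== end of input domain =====

-- B replaces "build all n component truth tables, then re-scan the tables per bit pair" by a single
-- sweep over the S-box entries that accumulates a pairwise agreement counter, reduced to the max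
-- deviation at the end (objective: alternative decomposition, same asymptotic cost).

-- ===== PORT A =====
-- range(a, b) is ported as List.range' a (b - a) (exact for 0 ≤ a ≤ b, the only use here);
-- sbox[x] (0 ≤ x) is PySem.List.pyGetD sbox x 0 — Python raises out of range, excluded by Pre_.
def pvTT (sbox : List Int) (n : Nat) (bit : Nat) : List Int :=
  (List.range (2 ^ n)).map (fun x =>
    PySem.Int.band ((PySem.List.pyGetD sbox (Int.ofNat x) 0) >>> (n - 1 - bit)) 1)

def sbox_to_component_truth_tables (sbox : List Int) (n : Nat) : List (List Int) :=
  (List.range n).foldl (fun comps bit => comps ++ [pvTT sbox n bit]) []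

def compute_bit_independence (sbox : List Int) (n_bits : Int) : Int :=
  let n := n_bits.toNat
  let size := 2 ^ n
  let components := sbox_to_component_truth_tables sbox n
  let correlations :=
    (List.range n).foldl (fun acc i =>
      (List.range' (i + 1) (n - (i + 1))).foldl (fun acc j =>
        let tt1 := components.getD i []
        let tt2 := components.getD j []
        let corr := (List.range size).foldl
          (fun c x => if tt1.getD x 0 == tt2.getD x 0 then c + 1 else c) (0 : Int)
        acc ++ [|corr - PySem.Int.floordiv (size : Int) 2|]) acc) []
  if correlations = [] then 0
  else (PySem.List.max? correlations (fun y => y)).getD 0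

-- ===== PORT B =====
def pvPairs (n : Nat) : List (Nat × Nat) :=
  (List.range n).flatMap (fun i => (List.range' (i + 1) (n - (i + 1))).map (fun j => (i, j)))

def pvBits (sbox : List Int) (n : Nat) (x : Nat) : List Int :=
  (List.range n).map (fun k =>
    PySem.Int.band ((PySem.List.pyGetD sbox (Int.ofNat x) 0) >>> (n - 1 - k)) 1)

def compute_bit_independence_alt (sbox : List Int) (n_bits : Int) : Int :=
  if n_bits < 2 then 0 else
  let n := n_bits.toNat
  let size := 2 ^ n
  let pairs := pvPairs n
  let agree :=
    (List.range size).foldl (fun d x =>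
      let bits := pvBits sbox n x
      pairs.foldl (fun d p =>
        d.modify p 0 (· + (if bits.getD p.1 0 == bits.getD p.2 0 then (1 : Int) else 0))) d)
      PySem.Dict.empty
  let half := PySem.Int.floordiv (size : Int) 2
  (PySem.List.max? (pairs.map (fun p => |agree.getD p 0 - half|)) (fun y => y)).getD 0

-- ===== PRECONDITION & SPEC =====
-- Pre_ = exactly the inputs where Python A returns: n_bits ≥ 0 (else "1 << n_bits" raises ValueError)
-- and 2^n_bits ≤ len(sbox), i.e. n_bits ≤ log2 len(sbox) (else sbox[x] raises IndexError; vacuous for n_bits = 0).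
def Pre_compute_bit_independence (sbox : List Int) (n_bits : Int) : Prop :=
  0 ≤ n_bits ∧ n_bits.toNat ≤ Nat.log2 sbox.length
instance (sbox : List Int) (n_bits : Int) : Decidable (Pre_compute_bit_independence sbox n_bits) := by
  unfold Pre_compute_bit_independence; infer_instance

def pvWitness_compute_bit_independence : List Int × Int := ([3, 0, 2, 1], 2)

def Spec_compute_bit_independence (sbox : List Int) (n_bits : Int) (out : Int) : Prop := out = compute_bit_independence_alt sbox n_bits
instance (sbox : List Int) (n_bits : Int) (out : Int) : Decidable (Spec_compute_bit_independence sbox n_bits out) := by unfold Spec_compute_bit_independence; infer_instance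

-- ===== CLAIM (what is proved, stated in full; the proofs are below) =====
def Claim_equal_compute_bit_independence : Prop := ∀ (sbox : List Int) (n_bits : Int), Dom_compute_bit_independence sbox n_bits → Pre_compute_bit_independence sbox n_bits → Spec_compute_bit_independence sbox n_bits (compute_bit_independence sbox n_bits)

-- ===== LEMMAS AND PROOFS =====

-- the bit value both programs extract, and the common per-pair deviation
def pvBit (sbox : List Int) (n k x : Nat) : Int :=
  PySem.Int.band ((PySem.List.pyGetD sbox (Int.ofNat x) 0) >>> (n - 1 - k)) 1

def pvG (sbox : List Int) (n : Nat) (p : Nat × Nat) : Int :=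
  |((List.range (2 ^ n)).map
      (fun x => if pvBit sbox n p.1 x == pvBit sbox n p.2 x then (1 : Int) else 0)).sum
    - PySem.Int.floordiv ((2 ^ n : Nat) : Int) 2|

lemma pvPairs_nodup (n : Nat) : (pvPairs n).Nodup := by
  unfold pvPairs
  rw [List.nodup_flatMap]
  constructor
  · intro i _
    exact (List.nodup_range').map (fun a b h => by injection h)
  · have h := List.pairwise_lt_range (n := n)
    refine h.imp ?_
    intro a b hab x hxa hxb
    simp only [List.mem_map] at hxa hxb
    obtain ⟨j1, _, h1⟩ := hxa
    obtain ⟨j2, _, h2⟩ := hxb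
    rw [← h1] at h2
    have hba : b = a := congrArg Prod.fst h2
    omega

lemma pvPairs_mem_lt {n : Nat} {p : Nat × Nat} (h : p ∈ pvPairs n) : p.1 < n ∧ p.2 < n := by
  simp only [pvPairs, List.mem_flatMap, List.mem_map, List.mem_range, List.mem_range'_1] at h
  obtain ⟨i, hi, j, hj, rfl⟩ := h
  simp; omega

lemma getD_foldl_modify_not_mem {κ : Type} [BEq κ] [LawfulBEq κ] (P : List κ) (w : κ → Int)
    (d : PySem.Dict κ Int) (q : κ) (hq : q ∉ P) :
    (P.foldl (fun d p => d.modify p 0 (· + w p)) d).getD q 0 = d.getD q 0 := by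
  induction P generalizing d with
  | nil => rfl
  | cons p t ih =>
    simp only [List.mem_cons, not_or] at hq
    rw [List.foldl_cons, ih _ hq.2, PySem.Dict.getD_modify_of_ne _ _ _ hq.1]

lemma getD_foldl_modify_once {κ : Type} [BEq κ] [LawfulBEq κ] (P : List κ) (w : κ → Int)
    (d : PySem.Dict κ Int) (q : κ) (hnd : P.Nodup) :
    (P.foldl (fun d p => d.modify p 0 (· + w p)) d).getD q 0
      = d.getD q 0 + (if q ∈ P then w q else 0) := by
  induction P generalizing d with
  | nil => simp
  | cons p t ih =>
    rw [List.nodup_cons] at hnd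
    rw [List.foldl_cons]
    by_cases hqp : q = p
    · subst hqp
      rw [getD_foldl_modify_not_mem _ _ _ _ hnd.1, PySem.Dict.getD_modify_self]
      simp
    · rw [ih _ hnd.2, PySem.Dict.getD_modify_of_ne _ _ _ hqp]
      simp [List.mem_cons, hqp]

lemma getD_outer {κ : Type} [BEq κ] [LawfulBEq κ] (xs : List Nat) (P : List κ)
    (w : Nat → κ → Int) (d : PySem.Dict κ Int) (q : κ) (hnd : P.Nodup) (hq : q ∈ P) :
    (xs.foldl (fun d x => P.foldl (fun d p => d.modify p 0 (· + w x p)) d) d).getD q 0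
      = d.getD q 0 + (xs.map (fun x => w x q)).sum := by
  induction xs generalizing d with
  | nil => simp
  | cons x t ih =>
    rw [List.foldl_cons, ih, getD_foldl_modify_once _ _ _ _ hnd]
    simp [hq]; ring

lemma foldl_ite_count (xs : List Nat) (p : Nat → Bool) (c : Int) :
    xs.foldl (fun c x => if p x then c + 1 else c) c
      = c + (xs.map (fun x => if p x then (1 : Int) else 0)).sum := by
  induction xs generalizing c with
  | nil => simp
  | cons x t ih =>
    simp only [List.foldl_cons, List.map_cons, List.sum_cons]
    by_cases h : p x
    · simp only [h, if_true, ih]; ring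
    · simp only [h, ih]; simp

lemma pvPairs_small (n : Nat) (h : n ≤ 1) : pvPairs n = [] := by
  interval_cases n <;> rfl

lemma pvPairs_ne_nil (n : Nat) (h : 2 ≤ n) : pvPairs n ≠ [] := by
  have : (0, 1) ∈ pvPairs n := by
    simp only [pvPairs, List.mem_flatMap, List.mem_map, List.mem_range, List.mem_range'_1]
    exact ⟨0, by omega, 1, by omega, rfl⟩
  intro hnil; rw [hnil] at this; exact absurd this (List.not_mem_nil)

lemma components_eq (sbox : List Int) (n : Nat) :
    sbox_to_component_truth_tables sbox n = (List.range n).map (pvTT sbox n) := by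
  unfold sbox_to_component_truth_tables
  rw [PySem.List.foldl_append_singleton_eq_map]
  simp

lemma getD_map_range {α : Type} (n k : Nat) (f : Nat → α) (d : α) (hk : k < n) :
    ((List.range n).map f).getD k d = f k := by
  rw [List.getD_eq_getElem?_getD, List.getElem?_map, List.getElem?_range hk]
  rfl

lemma A_eq (sbox : List Int) (n_bits : Int) :
    compute_bit_independence sbox n_bits
      = (if (pvPairs n_bits.toNat).map (pvG sbox n_bits.toNat) = [] then 0
         else (PySem.List.max? ((pvPairs n_bits.toNat).map (pvG sbox n_bits.toNat)) (fun y => y)).getD 0) := by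
  have hcorr :
      (List.range n_bits.toNat).foldl (fun acc i =>
        (List.range' (i + 1) (n_bits.toNat - (i + 1))).foldl (fun acc j =>
          acc ++ [|(List.range (2 ^ n_bits.toNat)).foldl
            (fun c x => if ((sbox_to_component_truth_tables sbox n_bits.toNat).getD i []).getD x 0
                == ((sbox_to_component_truth_tables sbox n_bits.toNat).getD j []).getD x 0
              then c + 1 else c) (0 : Int)
            - PySem.Int.floordiv ((2 ^ n_bits.toNat : Nat) : Int) 2|]) acc) []
      = (pvPairs n_bits.toNat).map (pvG sbox n_bits.toNat) := by
    set n := n_bits.toNat with hn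
    simp only [PySem.List.foldl_append_singleton_eq_map, PySem.List.foldl_append_eq_flatMap,
      List.nil_append]
    rw [pvPairs, List.map_flatMap]
    refine List.flatMap_congr ?_
    intro i hi
    rw [List.map_map]
    refine List.map_congr_left ?_
    intro j hj
    rw [List.mem_range] at hi
    rw [List.mem_range'_1] at hj
    have hjn : j < n := by omega
    simp only [Function.comp]
    rw [components_eq, getD_map_range _ _ _ _ hi, getD_map_range _ _ _ _ hjn]
    rw [PySem.List.foldl_congr_mem' _ _
      (fun c x => if pvBit sbox n i x == pvBit sbox n j x then c + 1 else c) _ ?_]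
    · rw [foldl_ite_count (List.range (2 ^ n)) (fun x => pvBit sbox n i x == pvBit sbox n j x)]
      simp [pvG]
    · intro x hx c
      rw [List.mem_range] at hx
      unfold pvTT
      rw [getD_map_range _ _ _ _ hx, getD_map_range _ _ _ _ hx]
      rfl
  unfold compute_bit_independence
  simp only []
  rw [hcorr]

lemma B_eq (sbox : List Int) (n_bits : Int) :
    compute_bit_independence_alt sbox n_bits
      = (if n_bits < 2 then 0
         else (PySem.List.max? ((pvPairs n_bits.toNat).map (pvG sbox n_bits.toNat)) (fun y => y)).getD 0) := by
  unfold compute_bit_independence_alt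
  by_cases h : n_bits < 2
  · simp [h]
  · simp only [if_neg h]
    set n := n_bits.toNat with hn
    have hmap : (pvPairs n).map (fun p =>
        |((List.range (2 ^ n)).foldl (fun d x =>
            (pvPairs n).foldl (fun d p =>
              d.modify p 0 (· + (if (pvBits sbox n x).getD p.1 0 == (pvBits sbox n x).getD p.2 0
                then (1 : Int) else 0))) d)
          PySem.Dict.empty).getD p 0 - PySem.Int.floordiv ((2 ^ n : Nat) : Int) 2|)
        = (pvPairs n).map (pvG sbox n) := by
      refine List.map_congr_left ?_
      intro p hp
      obtain ⟨h1, h2⟩ := pvPairs_mem_lt hp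
      rw [getD_outer (List.range (2 ^ n)) (pvPairs n)
        (fun x p => if (pvBits sbox n x).getD p.1 0 == (pvBits sbox n x).getD p.2 0
          then (1 : Int) else 0) _ _ (pvPairs_nodup n) hp]
      rw [PySem.Dict.getD_empty]
      unfold pvG
      rw [zero_add]
      have hm : (List.range (2 ^ n)).map
          (fun x => if (pvBits sbox n x).getD p.1 0 == (pvBits sbox n x).getD p.2 0
            then (1 : Int) else 0)
          = (List.range (2 ^ n)).map
          (fun x => if pvBit sbox n p.1 x == pvBit sbox n p.2 x then (1 : Int) else 0) := by
        refine List.map_congr_left ?_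
        intro x _
        unfold pvBits pvBit
        rw [getD_map_range _ _ _ _ h1, getD_map_range _ _ _ _ h2]
      rw [hm]
    rw [hmap]

lemma main_eq (sbox : List Int) (n_bits : Int) :
    compute_bit_independence sbox n_bits = compute_bit_independence_alt sbox n_bits := by
  rw [A_eq, B_eq]
  by_cases h : n_bits < 2
  · have hn : n_bits.toNat ≤ 1 := by omega
    rw [pvPairs_small _ hn]
    simp [h]
  · have h2 : 2 ≤ n_bits.toNat := by omega
    have hne := pvPairs_ne_nil _ h2
    rw [if_neg h, if_neg (by simpa [List.map_eq_nil_iff] using hne)]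

-- ===== VERDICT (by name: the statement is the Claim_ definition above) =====
theorem compute_bit_independence_spec : Claim_equal_compute_bit_independence := by
  intro sbox n_bits _ _
  unfold Spec_compute_bit_independence
  exact main_eq sbox n_bits
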